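-- pv_equiv track=rewrite | github.com/josfervi/Programming-for-Sport | zz_codility/zz_F13XTR4D3/task2.py | solution
-- ===== SOURCE A (Python) =====
-- def solution(A):
--     """Given a non-empty array, A, of N integers,
--            find the maximum difference between
--            two parts of the array.
--            (See problem statement.)
--     """
--
--     N = len(A)
--
--     # Precompute premax and postmax in O(N) time using O(N) extra space.
--
--
--     # premax[k] = max(A[:k+1]) = max(A[0], A[1], ..., A[k])
--     #
--     #   premax[k+1] = max(premax[k], A[k+1])
--     #
--     #   premax[k] = A[k] = A[0],            k == 0
--     #   premax[k] = max(premax[k-1], A[k]), 0 <  k < N-1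
--     premax = [None] * (N-1) # allocate space for premax
--     premax[0] = A[0]
--     for k in range(1, N-1):
--         premax[k] = max(premax[k-1], A[k])
--
--
--     # postmax[k] = max(A[k+1:]) = max(A[k+1], A[k+2], ..., A[N-1])
--     #
--     #   postmax[k-1] = max(A[k:]) = max(A[k], A[k+1], ..., A[N-1]) = max(A[k], postmax[k])
--     #
--     #   postmax[k] = A[k+1] = A[N-1],           k == N-2
--     #   postmax[k] = max(A[k+1], postmax[k+1]), 0 <= k   < N-2
--     postmax = [None] * (N-1)
--     postmax[N-2] = A[N-1]
--     for k in reversed(range(0, N-2)):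
--         postmax[k] = max(A[k+1], postmax[k+1])
--
--
--     # Find the maximum difference in O(N) time using premax and postmax.
--
--     max_difference_soFar = 0 # the smallest possible difference
--
--     for k in range(0, N-1):
--
--         current_difference = abs(postmax[k] - premax[k])
--         max_difference_soFar = max(max_difference_soFar, current_difference)
--
--     max_difference = max_difference_soFar
--     return max_difference
-- ===== SOURCE B (Python) =====
-- def solution(A):
--     # premax is nondecreasing and postmax nonincreasing, so the signed
--     # difference postmax[k] - premax[k] is nonincreasing in k and its maximum
--     # absolute value is attained at k == 0 or k == N-2.
--     return max(abs(max(A[1:]) - A[0]), abs(A[-1] - max(A[:-1])))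
-- ===== Notes on version B (the rewrite author's own statement) =====
-- stated objective: simpler
-- what changed: Drops the premax/postmax auxiliary arrays and the final scan entirely: since the prefix max is nondecreasing and the suffix max nonincreasing, the signed difference is monotone, so its maximum absolute value is attained at an endpoint and B returns max(abs(max(A[1:])-A[0]), abs(A[-1]-max(A[:-1]))).
-- outside the precondition, e.g. on solution([0]): A raises IndexError, B raises ValueError; on solution([]): A raises IndexError, B raises ValueError; on solution([-1]): A raises IndexError, B raises ValueError
import Mathlib
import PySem

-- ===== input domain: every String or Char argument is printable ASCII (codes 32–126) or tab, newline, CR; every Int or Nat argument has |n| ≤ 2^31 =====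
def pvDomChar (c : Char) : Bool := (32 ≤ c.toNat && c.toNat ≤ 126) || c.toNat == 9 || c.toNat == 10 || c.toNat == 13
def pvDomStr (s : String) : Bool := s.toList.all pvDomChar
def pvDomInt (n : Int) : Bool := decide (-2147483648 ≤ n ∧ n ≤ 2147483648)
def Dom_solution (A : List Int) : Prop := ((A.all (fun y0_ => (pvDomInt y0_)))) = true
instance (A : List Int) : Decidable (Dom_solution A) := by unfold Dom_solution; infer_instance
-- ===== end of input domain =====

-- B replaces A's premax/postmax arrays and final scan by the closed form
-- max(|max(A[1:])-A[0]|, |A[-1]-max(A[:-1])|), valid because the signed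
-- prefix/suffix-max difference is monotone; equal to A on lists of length ≥ 2.


-- ===== PORT A =====
-- premax[0]=A[0] then the range(1,N-1) loop appends each newly written cell;
-- postmax[N-2]=A[N-1] then the reversed(range(0,N-2)) loop prepends each cell.
def solution (A : List Int) : Int :=
  let N : Int := A.length
  let premax : List Int :=
    (PySem.List.pyRange 1 (N - 1) 1).foldl
      (fun pm k => pm ++ [max (PySem.List.pyGetD pm (k - 1) 0) (PySem.List.pyGetD A k 0)])
      [PySem.List.pyGetD A 0 0]
  let postmax : List Int :=
    ((PySem.List.pyRange 0 (N - 2) 1).reverse).foldl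
      (fun po k => max (PySem.List.pyGetD A (k + 1) 0) (PySem.List.pyGetD po 0 0) :: po)
      [PySem.List.pyGetD A (N - 1) 0]
  (PySem.List.pyRange 0 (N - 1) 1).foldl
    (fun acc k => max acc |PySem.List.pyGetD postmax k 0 - PySem.List.pyGetD premax k 0|) 0

-- ===== PORT B =====
def solution_alt (A : List Int) : Int :=
  let m1 := (PySem.List.max? (PySem.List.slice A (some 1) none) (fun y => y)).getD 0
  let m2 := (PySem.List.max? (PySem.List.slice A none (some (-1))) (fun y => y)).getD 0
  max |m1 - PySem.List.pyGetD A 0 0| |PySem.List.pyGetD A (-1) 0 - m2|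

-- ===== PRECONDITION & SPEC =====
-- Pre_ excludes only lists of length < 2, on which the Python A raises IndexError
-- (it indexes an empty premax for N == 1 and A[0] on the empty list for N == 0).
def Pre_solution (A : List Int) : Prop := 2 ≤ A.length
instance (A : List Int) : Decidable (Pre_solution A) := by unfold Pre_solution; infer_instance
def pvWitness_solution : List Int := ([1, -3, 2] : List Int)

def Spec_solution (A : List Int) (out : Int) : Prop := out = solution_alt A
instance (A : List Int) (out : Int) : Decidable (Spec_solution A out) := by unfold Spec_solution; infer_instance

-- ===== CLAIM (what is proved, stated in full; the proofs are below) =====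
def Claim_equal_solution : Prop := ∀ (A : List Int), Dom_solution A → Pre_solution A → Spec_solution A (solution A)

-- ===== LEMMAS AND PROOFS =====

-- prefix maximum: preM A k = max(A[0..k])
def preM (A : List Int) : ℕ → Int
  | 0 => A.getD 0 0
  | k+1 => max (preM A k) (A.getD (k+1) 0)

-- suffix maximum counted from the right: sfxM A c = max(A[n-1-c..n-1])
def sfxM (A : List Int) : ℕ → Int
  | 0 => A.getD (A.length - 1) 0
  | c+1 => max (A.getD (A.length - 2 - c) 0) (sfxM A c)

-- max of a nonempty list (0 on [])
def maxOf : List Int → Int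
  | [] => 0
  | x :: t => t.foldl max x

-- the prepending loop of port A, as a recursion
def scanb (A : List Int) : ℕ → List Int → List Int
  | 0, po => po
  | j+1, po => scanb A j (max (PySem.List.pyGetD A ((j : Int) + 1) 0) (PySem.List.pyGetD po 0 0) :: po)

theorem foldl_max_shift (t : List Int) (a b : Int) :
    t.foldl max (max a b) = max a (t.foldl max b) := by
  induction t generalizing b with
  | nil => rfl
  | cons c t ih => simp only [List.foldl_cons, max_assoc, ih]

theorem maxOf_cons (x : Int) (l : List Int) (h : l ≠ []) :
    maxOf (x :: l) = max x (maxOf l) := by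
  cases l with
  | nil => exact absurd rfl h
  | cons y t => simp only [maxOf, List.foldl_cons, foldl_max_shift]

theorem maxOf_append_singleton (l : List Int) (x : Int) (h : l ≠ []) :
    maxOf (l ++ [x]) = max (maxOf l) x := by
  cases l with
  | nil => exact absurd rfl h
  | cons y t => simp only [maxOf, List.cons_append, List.foldl_append, List.foldl_cons, List.foldl_nil]

theorem preM_mono (A : List Int) (k m : ℕ) (h : k ≤ m) : preM A k ≤ preM A m := by
  induction m with
  | zero => simp_all
  | succ m ih =>
    rcases Nat.lt_or_ge k (m+1) with h' | h'
    · exact le_trans (ih (by omega)) (le_max_left _ _)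
    · have : k = m + 1 := by omega
      subst this; rfl

theorem sfxM_mono (A : List Int) (c d : ℕ) (h : c ≤ d) : sfxM A c ≤ sfxM A d := by
  induction d with
  | zero => simp_all
  | succ d ih =>
    rcases Nat.lt_or_ge c (d+1) with h' | h'
    · exact le_trans (ih (by omega)) (le_max_right _ _)
    · have : c = d + 1 := by omega
      subst this; rfl

theorem maxOf_getD (l : List Int) (h : l ≠ []) :
    (PySem.List.max? l (fun y => y)).getD 0 = maxOf l := by
  cases l with
  | nil => exact absurd rfl h
  | cons x t => rw [PySem.List.max?_id_cons]; rfl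

theorem preM_eq_maxOf (A : List Int) (k : ℕ) (h : k < A.length) :
    preM A k = maxOf (A.take (k+1)) := by
  induction k with
  | zero =>
    cases A with
    | nil => simp at h
    | cons a t => simp [preM, maxOf]
  | succ k ih =>
    have hk : k < A.length := by omega
    have hget : A[k+1]? = some A[k+1] := List.getElem?_eq_getElem h
    rw [List.take_add_one, hget]
    simp only [Option.toList_some]
    have hne : A.take (k+1) ≠ [] := by
      have : (A.take (k+1)).length = k+1 := by
        rw [List.length_take]; omega
      intro hnil; rw [hnil] at this; simp at this
    rw [maxOf_append_singleton _ _ hne, ← ih hk]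
    simp only [preM]
    rw [List.getD_eq_getElem A 0 h]

theorem sfxM_eq_maxOf (A : List Int) (c : ℕ) (h : c ≤ A.length - 1) (hA : A ≠ []) :
    sfxM A c = maxOf (A.drop (A.length - 1 - c)) := by
  have hn : 1 ≤ A.length := List.length_pos_iff.mpr hA
  induction c with
  | zero =>
    simp only [Nat.sub_zero]
    have h1 : A.length - 1 < A.length := by omega
    rw [List.drop_eq_getElem_cons h1]
    have : A.length - 1 + 1 = A.length := by omega
    rw [this, List.drop_length]
    simp only [sfxM, maxOf, List.foldl_nil]
    rw [List.getD_eq_getElem A 0 h1]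
  | succ c ih =>
    have hc : c ≤ A.length - 1 := by omega
    have h2 : A.length - 1 - (c+1) = A.length - 2 - c := by omega
    have h3 : A.length - 2 - c < A.length := by omega
    rw [h2, List.drop_eq_getElem_cons h3]
    have h4 : A.length - 2 - c + 1 = A.length - 1 - c := by omega
    rw [h4]
    have hne : A.drop (A.length - 1 - c) ≠ [] := by
      have : (A.drop (A.length - 1 - c)).length = A.length - (A.length - 1 - c) := List.length_drop ..
      intro hnil; rw [hnil] at this; simp at this; omega
    rw [maxOf_cons _ _ hne, ← ih hc]
    simp only [sfxM]
    rw [List.getD_eq_getElem A 0 h3]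

-- the appending loop of port A builds the prefix maxima
theorem premax_char (A : List Int) (j : ℕ) :
    (List.range j).foldl
      (fun pm (k : ℕ) => pm ++ [max (PySem.List.pyGetD pm (1 + (k : Int) - 1) 0)
                                    (PySem.List.pyGetD A (1 + (k : Int)) 0)])
      [PySem.List.pyGetD A 0 0]
    = (List.range (j+1)).map (preM A) := by
  induction j with
  | zero => simp [preM, PySem.List.pyGetD_zero]
  | succ j ih =>
    rw [List.range_succ, List.foldl_append, List.foldl_cons, List.foldl_nil, ih]
    have e1 : (1 : Int) + (j : Int) - 1 = ((j : ℕ) : Int) := by ring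
    have e2 : (1 : Int) + (j : Int) = (((j+1 : ℕ)) : Int) := by push_cast; ring
    rw [e1, e2, PySem.List.pyGetD_natCast, PySem.List.pyGetD_natCast]
    rw [List.range_succ (n := j+1), List.map_append]
    congr 1
    have hj : j < j + 1 := by omega
    have : ((List.range (j+1)).map (preM A)).getD j 0 = preM A j := by
      rw [List.getD_eq_getElem _ 0 (by simp)]
      simp
    rw [this]
    simp [preM, List.getD]

theorem scanb_eq_foldl (A : List Int) (j : ℕ) (init : List Int) :
    ((List.range j).reverse).foldl
      (fun po (k : ℕ) => max (PySem.List.pyGetD A ((k : Int) + 1) 0) (PySem.List.pyGetD po 0 0) :: po)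
      init
    = scanb A j init := by
  induction j generalizing init with
  | zero => rfl
  | succ j ih =>
    rw [List.range_succ, List.reverse_append]
    simp only [List.reverse_cons, List.reverse_nil, List.nil_append, List.cons_append,
      List.foldl_cons, List.nil_append]
    exact ih _

-- the prepending loop builds the suffix maxima
theorem scanb_spec (A : List Int) (j : ℕ) (h : j ≤ A.length - 2) (hn : 2 ≤ A.length) :
    scanb A j ((List.range (A.length - 1 - j)).map (fun i => sfxM A (A.length - 2 - j - i)))
    = (List.range (A.length - 1)).map (fun i => sfxM A (A.length - 2 - i)) := by
  induction j with
  | zero => simp [scanb]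
  | succ j ih =>
    have hj : j ≤ A.length - 2 := by omega
    simp only [scanb]
    have hstate : (max (PySem.List.pyGetD A ((j : Int) + 1) 0)
        (PySem.List.pyGetD ((List.range (A.length - 1 - (j+1))).map
          (fun i => sfxM A (A.length - 2 - (j+1) - i))) 0 0)
        :: (List.range (A.length - 1 - (j+1))).map (fun i => sfxM A (A.length - 2 - (j+1) - i)))
        = (List.range (A.length - 1 - j)).map (fun i => sfxM A (A.length - 2 - j - i)) := by
      -- head of the old state is sfxM A (A.length - 3 - j)
      have hhead : PySem.List.pyGetD ((List.range (A.length - 1 - (j+1))).map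
          (fun i => sfxM A (A.length - 2 - (j+1) - i))) 0 0 = sfxM A (A.length - 3 - j) := by
        rw [PySem.List.pyGetD_zero]
        have hlen : A.length - 1 - (j+1) = (A.length - 2 - (j+1)) + 1 := by omega
        rw [hlen, List.range_succ_eq_map]
        simp only [List.map_cons, List.getD, List.getElem?_cons_zero, Option.getD_some]
        have : A.length - 2 - (j+1) - 0 = A.length - 3 - j := by omega
        rw [this]
      rw [hhead]
      have e2 : ((j : Int)) + 1 = (((j+1 : ℕ)) : Int) := by push_cast; ring
      rw [e2, PySem.List.pyGetD_natCast]
      have hval : max (A.getD (j+1) 0) (sfxM A (A.length - 3 - j)) = sfxM A (A.length - 2 - j) := by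
        have hc : A.length - 2 - j = (A.length - 3 - j) + 1 := by omega
        rw [hc]
        simp only [sfxM]
        have : A.length - 2 - (A.length - 3 - j) = j + 1 := by omega
        rw [this]
      rw [hval]
      have hr : A.length - 1 - (j+1) = A.length - 2 - j := by omega
      rw [hr]
      have hlen2 : A.length - 1 - j = (A.length - 2 - j) + 1 := by omega
      rw [hlen2, List.range_succ_eq_map, List.map_cons, List.map_map]
      have h0 : A.length - 2 - j - 0 = A.length - 2 - j := by omega
      rw [h0]
      congr 1
      apply List.map_congr_left
      intro i _
      simp only [Function.comp_apply]
      have : A.length - 2 - (j+1) - i = A.length - 2 - j - (i+1) := by omega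
      rw [this]
    rw [hstate]
    exact ih hj

theorem foldl_max_le (f : ℕ → Int) (l : List ℕ) (acc B : Int)
    (h0 : acc ≤ B) (h : ∀ k ∈ l, f k ≤ B) :
    l.foldl (fun a k => max a (f k)) acc ≤ B := by
  induction l generalizing acc with
  | nil => exact h0
  | cons x t ih =>
    exact ih _ (max_le h0 (h x List.mem_cons_self)) (fun k hk => h k (List.mem_cons_of_mem _ hk))

-- A's final scan collapses to its two endpoints
theorem fold_endpoints (f : ℕ → Int) (n : ℕ) (hn : 2 ≤ n)
    (hnonneg : ∀ k, 0 ≤ f k)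
    (hbound : ∀ k ≤ n - 2, f k ≤ max (f 0) (f (n-2))) :
    (List.range (n-1)).foldl (fun a k => max a (f k)) 0 = max (f 0) (f (n-2)) := by
  apply le_antisymm
  · apply foldl_max_le
    · exact le_trans (hnonneg 0) (le_max_left _ _)
    · intro k hk
      have hk' : k < n - 1 := List.mem_range.mp hk
      exact hbound k (by omega)
  · obtain ⟨-, hmem⟩ := PySem.List.le_foldl_max_int (List.range (n-1)) f 0
    apply max_le
    · exact hmem 0 (List.mem_range.mpr (by omega))
    · exact hmem (n-2) (List.mem_range.mpr (by omega))

-- characterization of port A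
theorem solutionA_char (A : List Int) (h : 2 ≤ A.length) :
    solution A = (List.range (A.length - 1)).foldl
      (fun acc k => max acc |sfxM A (A.length - 2 - k) - preM A k|) 0 := by
  simp only [solution]
  rw [PySem.List.pyRange_one 1 ((A.length : Int) - 1),
      PySem.List.pyRange_one 0 ((A.length : Int) - 2),
      PySem.List.pyRange_one 0 ((A.length : Int) - 1)]
  have e1 : ((A.length : Int) - 1 - 1).toNat = A.length - 2 := by omega
  have e2 : ((A.length : Int) - 2 - 0).toNat = A.length - 2 := by omega
  have e3 : ((A.length : Int) - 1 - 0).toNat = A.length - 1 := by omega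
  rw [e1, e2, e3]
  simp only [zero_add, ← List.map_reverse, List.foldl_map]
  rw [premax_char A (A.length - 2)]
  rw [scanb_eq_foldl A (A.length - 2)]
  have e4 : A.length - 2 + 1 = A.length - 1 := by omega
  rw [e4]
  have einit : [PySem.List.pyGetD A ((A.length : Int) - 1) 0]
      = (List.range (A.length - 1 - (A.length - 2))).map
          (fun i => sfxM A (A.length - 2 - (A.length - 2) - i)) := by
    have e5 : A.length - 1 - (A.length - 2) = 1 := by omega
    have e6 : ((A.length : Int)) - 1 = (((A.length - 1 : ℕ)) : Int) := by omega
    rw [e5, e6, PySem.List.pyGetD_natCast]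
    simp [sfxM, List.range_one]
  rw [einit, scanb_spec A (A.length - 2) (by omega) h]
  apply PySem.List.foldl_congr_mem
  intro acc k hk
  have hk' : k < A.length - 1 := List.mem_range.mp hk
  rw [PySem.List.pyGetD_natCast, PySem.List.pyGetD_natCast]
  rw [List.getD_eq_getElem _ 0 (by simpa using hk'), List.getD_eq_getElem _ 0 (by simpa using hk')]
  simp

-- characterization of port B
theorem solutionB_char (A : List Int) (h : 2 ≤ A.length) :
    solution_alt A = max |sfxM A (A.length - 2) - preM A 0| |sfxM A 0 - preM A (A.length - 2)| := by
  have hA : A ≠ [] := by intro hnil; rw [hnil] at h; simp at h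
  have htne : A.tail ≠ [] := by
    intro hnil
    have h1 : A.tail.length = A.length - 1 := List.length_tail
    rw [hnil] at h1; simp at h1; omega
  have hdne : A.dropLast ≠ [] := by
    intro hnil
    have h1 : A.dropLast.length = A.length - 1 := List.length_dropLast
    rw [hnil] at h1; simp at h1; omega
  simp only [solution_alt]
  have hm1 : (PySem.List.max? (PySem.List.slice A (some 1) none) (fun y => y)).getD 0
      = sfxM A (A.length - 2) := by
    rw [PySem.List.slice_from_one, maxOf_getD _ htne]
    have e : A.length - 1 - (A.length - 2) = 1 := by omega
    rw [sfxM_eq_maxOf A (A.length - 2) (by omega) hA, e, List.drop_one]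
  have hm2 : (PySem.List.max? (PySem.List.slice A none (some (-1))) (fun y => y)).getD 0
      = preM A (A.length - 2) := by
    rw [PySem.List.slice_to_neg_one, maxOf_getD _ hdne, List.dropLast_eq_take,
        preM_eq_maxOf A (A.length - 2) (by omega)]
    have e : A.length - 2 + 1 = A.length - 1 := by omega
    rw [e]
  have h0 : PySem.List.pyGetD A 0 0 = preM A 0 := by
    rw [PySem.List.pyGetD_zero]; rfl
  have hl : PySem.List.pyGetD A (-1) 0 = sfxM A 0 := by
    rw [PySem.List.pyGetD_neg_one A 0 hA, List.getLast_eq_getElem]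
    simp only [sfxM]
    rw [List.getD_eq_getElem A 0 (by omega)]
  rw [hm1, hm2, h0, hl]

-- ===== VERDICT (by name: the statement is the Claim_ definition above) =====
theorem solution_spec : Claim_equal_solution := by
  intro A _ hpre
  unfold Spec_solution
  have h : 2 ≤ A.length := hpre
  rw [solutionA_char A h, solutionB_char A h]
  set n := A.length with hn
  have hb : ∀ k ≤ n - 2,
      |sfxM A (n - 2 - k) - preM A k| ≤
      max |sfxM A (n - 2 - 0) - preM A 0| |sfxM A (n - 2 - (n-2)) - preM A (n-2)| := by
    intro k hk
    have h1 : sfxM A 0 ≤ sfxM A (n - 2 - k) := sfxM_mono A _ _ (by omega)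
    have h2 : sfxM A (n - 2 - k) ≤ sfxM A (n - 2) := sfxM_mono A _ _ (by omega)
    have h3 : preM A 0 ≤ preM A k := preM_mono A _ _ (by omega)
    have h4 : preM A k ≤ preM A (n - 2) := preM_mono A _ _ (by omega)
    have e0 : n - 2 - 0 = n - 2 := by omega
    have el : n - 2 - (n-2) = 0 := by omega
    rw [e0, el]
    rw [abs_le]
    constructor
    · have := neg_abs_le (sfxM A 0 - preM A (n-2))
      have hle : -(max |sfxM A (n-2) - preM A 0| |sfxM A 0 - preM A (n-2)|) ≤ -|sfxM A 0 - preM A (n-2)| := by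
        simp
      linarith [le_max_right |sfxM A (n-2) - preM A 0| |sfxM A 0 - preM A (n-2)|]
    · have := le_abs_self (sfxM A (n-2) - preM A 0)
      linarith [le_max_left |sfxM A (n-2) - preM A 0| |sfxM A 0 - preM A (n-2)|]
  have := fold_endpoints (fun k => |sfxM A (n - 2 - k) - preM A k|) n h
    (fun k => abs_nonneg _) hb
  rw [this]
  simp only [Nat.sub_zero, Nat.sub_self]
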